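-- pv_equiv track=rewrite | github.com/AlexanderSibirko/PythonGBStudy | Task7.py | create_predicats
-- ===== SOURCE A (Python) =====
-- def create_predicats(predicats_amount):
--     result = []
--     for j in range(1,predicats_amount+1):
--         curBool = True
--         k = 1
--         predicat = []
--         for i in range(0, 2 ** predicats_amount):
--             if (k > 2 ** (predicats_amount - j )):
--                 curBool = not curBool
--                 k = 1
--             k += 1
--             predicat.append(curBool)
--         result.append(tuple(predicat))
--     return tuple(result)
-- ===== SOURCE B (Python) =====
-- def create_predicats(predicats_amount):
--     return tuple(
--         tuple((i // 2 ** (predicats_amount - j)) % 2 == 0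
--               for i in range(2 ** predicats_amount))
--         for j in range(1, predicats_amount + 1)
--     )
-- ===== Notes on version B (the rewrite author's own statement) =====
-- stated objective: simpler
-- what changed: Replaced the stateful inner loop (running curBool flag plus flip counter k) by a closed-form per-index formula (i // 2**(n-j)) % 2 == 0, collapsing the whole function to one nested comprehension with no mutable state.
import Mathlib
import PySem

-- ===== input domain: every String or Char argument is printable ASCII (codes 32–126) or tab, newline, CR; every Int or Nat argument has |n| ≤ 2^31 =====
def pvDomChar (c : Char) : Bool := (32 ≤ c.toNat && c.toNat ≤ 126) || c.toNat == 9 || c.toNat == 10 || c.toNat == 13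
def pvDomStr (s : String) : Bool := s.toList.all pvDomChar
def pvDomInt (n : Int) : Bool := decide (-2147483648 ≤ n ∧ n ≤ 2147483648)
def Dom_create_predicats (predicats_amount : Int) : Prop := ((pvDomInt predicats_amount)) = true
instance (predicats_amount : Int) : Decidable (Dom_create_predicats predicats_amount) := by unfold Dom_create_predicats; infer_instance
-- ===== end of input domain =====

-- B replaces A's stateful flip-counter inner loop by the closed-form entry (i // 2^(n-j)) % 2 == 0 (simpler, no mutable state).


-- ===== PORT A =====
-- loop body of A's inner 'for i' loop: flip curBool and reset k when k exceeds the block size B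
def pvStepA (B : Int) (s : Bool × Int × List Bool) : Bool × Int × List Bool :=
  let p := if s.2.1 > B then (!s.1, (1 : Int)) else (s.1, s.2.1)
  (p.1, p.2 + 1, s.2.2 ++ [p.1])

def create_predicats (predicats_amount : Int) : List (List Bool) :=
  (PySem.List.pyRange 1 (predicats_amount + 1) 1).foldl
    (fun result j =>
      -- curBool = True; k = 1; predicat = []  then the inner loop; i is unused by the body
      let fin := (PySem.List.pyRange 0 ((2 : Int) ^ predicats_amount.toNat) 1).foldl
        (fun s _i => pvStepA ((2 : Int) ^ (predicats_amount - j).toNat) s)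
        (true, 1, [])
      result ++ [fin.2.2])
    []

-- ===== PORT B =====
def create_predicats_alt (predicats_amount : Int) : List (List Bool) :=
  (PySem.List.pyRange 1 (predicats_amount + 1) 1).map (fun j =>
    (PySem.List.pyRange 0 ((2 : Int) ^ predicats_amount.toNat) 1).map (fun i =>
      decide (PySem.Int.mod
        (PySem.Int.floordiv i ((2 : Int) ^ (predicats_amount - j).toNat)) 2 = 0)))

-- ===== PRECONDITION & SPEC =====
def Spec_create_predicats (predicats_amount : Int) (out : List (List Bool)) : Prop := out = create_predicats_alt predicats_amount
instance (predicats_amount : Int) (out : List (List Bool)) : Decidable (Spec_create_predicats predicats_amount out) := by unfold Spec_create_predicats; infer_instance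

-- ===== CLAIM (what is proved, stated in full; the proofs are below) =====
def Claim_equal_create_predicats : Prop := ∀ (predicats_amount : Int), Dom_create_predicats predicats_amount → Spec_create_predicats predicats_amount (create_predicats predicats_amount)

-- ===== LEMMAS AND PROOFS =====

-- a fold whose body ignores the element is an iterate of the body over the length
lemma pv_foldl_const {α σ : Type} (g : σ → σ) (l : List α) (init : σ) :
    l.foldl (fun s _ => g s) init = g^[l.length] init := by
  induction l generalizing init with
  | nil => rfl
  | cons a t ih => simpa [Function.iterate_succ_apply] using ih (g init)

lemma pv_parity (a : Nat) : (!decide (a % 2 = 0)) = decide ((a + 1) % 2 = 0) := by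
  by_cases h : a % 2 = 0
  · have h1 : (a + 1) % 2 = 1 := by omega
    simp [h, h1]
  · have h1 : (a + 1) % 2 = 0 := by omega
    simp [h, h1]

-- invariant of A's inner loop after M iterations (B ≥ 1):
-- curBool = parity of (M-1)/B, k = (M-1) % B + 2 (1 at start), list = closed-form column
lemma pv_iter_stepA (B : Nat) (hB : 1 ≤ B) (M : Nat) :
    (pvStepA ((B : Nat) : Int))^[M] (true, 1, ([] : List Bool)) =
      (decide (((M - 1) / B) % 2 = 0),
       (if M = 0 then 1 else (((M - 1) % B : Nat) : Int) + 2),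
       (List.range M).map (fun i => decide ((i / B) % 2 = 0))) := by
  induction M with
  | zero => simp [Nat.zero_div]
  | succ M ih =>
    rw [Function.iterate_succ_apply', ih]
    rcases Nat.eq_zero_or_pos M with hM | hM
    · subst hM
      have hcond : ¬ ((1 : Int) > (B : Int)) := by omega
      simp [pvStepA, hcond, List.range_succ, Nat.zero_div]
    · obtain ⟨M', rfl⟩ : ∃ M', M = M' + 1 := ⟨M - 1, by omega⟩
      have hMne : ¬ (M' + 1 = 0) := by omega
      have hr : M' % B < B := Nat.mod_lt _ (by omega)
      have hdm : B * (M' / B) + M' % B = M' := Nat.div_add_mod M' B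
      simp only [hMne, if_false, Nat.add_sub_cancel]
      by_cases hc : M' % B + 1 = B
      · -- flip step: k exceeds B, (M'+1) % B = 0
        have hM1 : M' + 1 = B * (M' / B) + B * 1 := by omega
        have hd : (M' + 1) / B = M' / B + 1 := by
          rw [hM1, ← Nat.mul_add, Nat.mul_div_cancel_left _ (by omega : 0 < B)]
        have hm : (M' + 1) % B = 0 := by
          rw [hM1, ← Nat.mul_add, Nat.mul_mod_right]
        have hcond : (((M' % B : Nat) : Int) + 2 > (B : Int)) := by push_cast; omega
        simp only [pvStepA, if_pos hcond, hd, hm, List.range_succ, List.map_append,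
          List.map_cons, List.map_nil, Prod.mk.injEq]
        refine ⟨pv_parity _, by norm_num, ?_⟩
        rw [pv_parity]
      · -- no flip: k ≤ B, (M'+1) % B = M' % B + 1, same quotient
        have hM1 : M' + 1 = (M' % B + 1) + B * (M' / B) := by omega
        have hd : (M' + 1) / B = M' / B := by
          rw [hM1, Nat.add_mul_div_left _ _ (by omega : 0 < B),
              Nat.div_eq_of_lt (by omega : M' % B + 1 < B), Nat.zero_add]
        have hm : (M' + 1) % B = M' % B + 1 := by
          rw [hM1, Nat.add_mul_mod_self_left, Nat.mod_eq_of_lt (by omega : M' % B + 1 < B)]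
        have hcond : ¬ (((M' % B : Nat) : Int) + 2 > (B : Int)) := by push_cast; omega
        simp only [pvStepA, if_neg hcond, hd, hm, List.range_succ, List.map_append,
          List.map_cons, List.map_nil, Prod.mk.injEq]
        refine ⟨trivial, by push_cast; ring, trivial⟩

-- one closed-form entry of B equals the Nat formula
lemma pv_elem_eq (k B : Nat) :
    decide (PySem.Int.mod (PySem.Int.floordiv (k : Int) (B : Int)) 2 = 0)
      = decide ((k / B) % 2 = 0) := by
  rw [PySem.Int.floordiv_natCast k B]
  have h2 : PySem.Int.mod (((k / B : Nat)) : Int) 2 = (((k / B) % 2 : Nat) : Int) := by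
    exact_mod_cast PySem.Int.mod_natCast (k / B) 2
  rw [h2, decide_eq_decide]
  omega

-- the whole column: A's inner loop result equals B's mapped closed form
lemma pv_column_eq (n j : Int) :
    ((PySem.List.pyRange 0 ((2 : Int) ^ n.toNat) 1).foldl
        (fun s _i => pvStepA ((2 : Int) ^ (n - j).toNat) s) (true, 1, [])).2.2
      = (PySem.List.pyRange 0 ((2 : Int) ^ n.toNat) 1).map (fun i =>
          decide (PySem.Int.mod (PySem.Int.floordiv i ((2 : Int) ^ (n - j).toNat)) 2 = 0)) := by
  have hB : ((2 : Int) ^ (n - j).toNat) = ((2 ^ (n - j).toNat : Nat) : Int) := by push_cast; ring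
  have hN : ((2 : Int) ^ n.toNat) = ((2 ^ n.toNat : Nat) : Int) := by push_cast; ring
  rw [pv_foldl_const, PySem.List.length_pyRange_one, PySem.List.pyRange_one]
  simp only [hB, hN, Int.sub_zero, Int.toNat_natCast]
  rw [pv_iter_stepA _ Nat.one_le_two_pow]
  simp only [List.map_map]
  refine List.map_congr_left ?_
  intro k _
  simp only [Function.comp_apply, zero_add]
  exact (pv_elem_eq k (2 ^ (n - j).toNat)).symm

-- ===== VERDICT (by name: the statement is the Claim_ definition above) =====
theorem create_predicats_spec : Claim_equal_create_predicats := by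
  intro n _
  unfold Spec_create_predicats create_predicats create_predicats_alt
  rw [PySem.List.foldl_append_singleton_eq_map]
  rw [List.nil_append]
  exact List.map_congr_left (fun j _ => pv_column_eq n j)
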